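-- pv_equiv track=rewrite | github.com/kbrbe/beltrans-data-integration | tools/string/utils_string.py | overlappingValues
-- ===== SOURCE A (Python) =====
-- import unicodedata as ud
--
-- def getNormalizedString(s):
--   """This function returns a normalized copy of the given string.
--
--   >>> getNormalizedString("HeLlO")
--   'hello'
--   >>> getNormalizedString("judaïsme, islam, christianisme, ET sectes apparentées")
--   'judaisme islam christianisme et sectes apparentees'
--   >>> getNormalizedString("chamanisme, de l’Antiquité…)")
--   'chamanisme de lantiquite)'
--
--   >>> getNormalizedString("Abe Ce De ?")
--   'abe ce de'
--   >>> getNormalizedString("Abe Ce De !")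
--   'abe ce de'
--   >>> getNormalizedString("Abe Ce De :")
--   'abe ce de'
--
--   >>> getNormalizedString("les soins palliatifs : éthique et témoignage")
--   'les soins palliatifs ethique et temoignage'
--
--   >>> getNormalizedString("978-2-87386-027-1")
--   '978-2-87386-027-1'
--
--   >>> getNormalizedString("A. W. Bruna & zoon")
--   'a. w. bruna & zoon'
--   >>> getNormalizedString("A.W. Bruna & Zoon")
--   'a.w. bruna & zoon'
--
--   """
--   charReplacements = {
--     ',': '',
--     '?': '',
--     '!': '',
--     ':': '',
--     ';': ''
--   }
--
--   # by the way: only after asci normalization the UTF character for ... becomes ...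
--   asciiNormalized = ud.normalize('NFKD', s).encode('ASCII', 'ignore').lower().strip().decode("utf-8")
--
--   normalized = ''.join([charReplacements.get(char, char) for char in asciiNormalized])
--   noDots = normalized.replace('...', '')
--   # remove double whitespaces using trick from stackoverflow.com/questions/8270092/remove-all-whitespace-in-a-string
--   return " ".join(noDots.split())
--
-- def overlappingValues(values):
--   """This function returns true if a value of one array element is also part of another array element.
--   >>> data = ['Jan Janssen', 'Janssen, Jan', 'John Doe']
--   >>> overlappingValues(data)
--   True
--   >>> data1 = ['John Doe', 'Alice', 'Bob', 'Pascal Renard, ']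
--   >>> overlappingValues(data1)
--   False
--
--   The function returns False if an empty array is given
--   >>> overlappingValues([])
--   False
--   """
--   lookup = {}
--   for value in values:
--     parts = value.replace(',', ' ').split(' ')
--     for p in parts:
--       namePart = getNormalizedString(p).strip()
--       if namePart != '':
--         if namePart in lookup:
--           lookup[namePart] = True
--         else:
--           lookup[namePart] = False
--
--   if True in lookup.values():
--     return True
--   else:
--     return False
-- ===== SOURCE B (Python) =====
-- import unicodedata as ud
--
-- def getNormalizedString(s):
--   charReplacements = {
--     ',': '',
--     '?': '',
--     '!': '',
--     ':': '',
--     ';': ''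
--   }
--   asciiNormalized = ud.normalize('NFKD', s).encode('ASCII', 'ignore').lower().strip().decode("utf-8")
--   normalized = ''.join([charReplacements.get(char, char) for char in asciiNormalized])
--   noDots = normalized.replace('...', '')
--   return " ".join(noDots.split())
--
-- def overlappingValues(values):
--   # stage 1: all normalized tokens (empties included) in one comprehension
--   tokens = [getNormalizedString(p).strip()
--             for value in values
--             for p in value.replace(',', ' ').split(' ')]
--   # stage 2: sort the non-empty tokens, so equal tokens become neighbours
--   s = sorted(t for t in tokens if t != '')
--   # stage 3: a repeat exists iff some adjacent pair of the sorted list is equal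
--   return any(a == b for a, b in zip(s, s[1:]))
-- ===== Notes on version B (the rewrite author's own statement) =====
-- stated objective: alternative
-- what changed: B detects a repeated normalized name-part by sorting the non-empty normalized tokens and scanning adjacent pairs for equality (comprehension, then sort, then zip-scan), instead of A's per-part seen/duplicate boolean dict and final scan of lookup.values() for True.
import Mathlib
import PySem

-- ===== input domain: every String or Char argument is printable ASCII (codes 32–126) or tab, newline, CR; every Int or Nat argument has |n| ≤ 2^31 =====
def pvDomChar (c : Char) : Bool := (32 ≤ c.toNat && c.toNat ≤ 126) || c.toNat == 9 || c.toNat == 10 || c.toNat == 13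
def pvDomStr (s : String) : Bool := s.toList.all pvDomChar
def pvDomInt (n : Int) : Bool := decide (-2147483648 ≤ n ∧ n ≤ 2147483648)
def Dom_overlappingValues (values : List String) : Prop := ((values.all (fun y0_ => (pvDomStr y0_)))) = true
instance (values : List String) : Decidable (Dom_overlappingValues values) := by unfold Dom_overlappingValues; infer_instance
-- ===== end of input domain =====

-- B replaces A's per-part seen/duplicate boolean dict and final values() scan by
-- sorting the non-empty normalized tokens and scanning adjacent pairs for equality
-- (a different duplicate-detection algorithm; similar cost).


-- ===== PORT A =====
-- getNormalizedString, shared verbatim by both Pythons. On the Dom (ASCII) strings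
-- ud.normalize('NFKD', s).encode('ASCII','ignore') is the identity and bytes
-- lower/strip agree with str lower/strip, so that composite step is ported as
-- strip ∘ lower (exact on the ASCII domain; Dom admits only ASCII).
def pvNorm (s : String) : String :=
  let asciiNormalized := PySem.Str.strip (PySem.Str.lower s)
  let normalized := PySem.Str.join "" (asciiNormalized.toList.map (fun c =>
    if c = ',' ∨ c = '?' ∨ c = '!' ∨ c = ':' ∨ c = ';' then "" else String.ofList [c]))
  let noDots := PySem.Str.replace normalized "..." ""
  PySem.Str.join " " (PySem.Str.split₀ noDots)

-- value.replace(',', ' ').split(' '): the separator is the non-empty literal ' ',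
-- so Str.split? always returns some; .getD [] only discharges the Option.
def overlappingValues (values : List String) : Bool :=
  let lookup := values.foldl (fun lookup value =>
    ((PySem.Str.split? (PySem.Str.replace value "," " ") " ").getD []).foldl (fun lookup p =>
      let namePart := PySem.Str.strip (pvNorm p)
      if namePart ≠ "" then
        if lookup.contains namePart then lookup.insert namePart true
        else lookup.insert namePart false
      else lookup) lookup) (PySem.Dict.empty : PySem.Dict String Bool)
  if true ∈ lookup.values then true else false

-- ===== PORT B =====
def overlappingValues_alt (values : List String) : Bool :=
  let tokens := values.flatMap (fun value =>
    ((PySem.Str.split? (PySem.Str.replace value "," " ") " ").getD []).map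
      (fun p => PySem.Str.strip (pvNorm p)))
  let s := PySem.List.sorted (tokens.filter (fun t => t ≠ "")) (fun x => x) false
  (s.zip (PySem.List.slice s (some 1) none)).any (fun ab => ab.1 == ab.2)

-- ===== PRECONDITION & SPEC =====
def Spec_overlappingValues (values : List String) (out : Bool) : Prop := out = overlappingValues_alt values
instance (values : List String) (out : Bool) : Decidable (Spec_overlappingValues values out) := by unfold Spec_overlappingValues; infer_instance

-- ===== CLAIM (what is proved, stated in full; the proofs are below) =====
def Claim_equal_overlappingValues : Prop := ∀ (values : List String), Dom_overlappingValues values → Spec_overlappingValues values (overlappingValues values)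

-- ===== LEMMAS AND PROOFS =====

-- the normalized non-empty parts contributed by one value
def pvParts (value : String) : List String :=
  (((PySem.Str.split? (PySem.Str.replace value "," " ") " ").getD []).map
     (fun p => PySem.Str.strip (pvNorm p))).filter (fun s => s ≠ "")

-- A's dict step on one (already normalized, non-empty) part
def pvDStep (d : PySem.Dict String Bool) (k : String) : PySem.Dict String Bool :=
  if d.contains k then d.insert k true else d.insert k false

-- a loop that skips empty normalizations is a fold over the filtered map
theorem pvFoldl_filter {β : Type} (f : String → String) (g : β → String → β)
    (l : List String) (b : β) :
    l.foldl (fun b x => if f x ≠ "" then g b (f x) else b) b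
    = ((l.map f).filter (fun s => s ≠ "")).foldl g b := by
  induction l generalizing b with
  | nil => rfl
  | cons x l ih =>
    rw [List.foldl_cons, List.map_cons, List.filter_cons]
    by_cases h : f x = ""
    · rw [if_neg (fun hne => hne h), ih]
      simp [h]
    · rw [if_pos h, ih]
      simp [h]

theorem pvA_inner (l : List String) (d : PySem.Dict String Bool) :
    l.foldl (fun lookup p =>
      let namePart := PySem.Str.strip (pvNorm p)
      if namePart ≠ "" then
        if lookup.contains namePart then lookup.insert namePart true
        else lookup.insert namePart false
      else lookup) d
    = ((l.map (fun p => PySem.Str.strip (pvNorm p))).filter (fun s => s ≠ "")).foldl pvDStep d := by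
  exact pvFoldl_filter (fun p => PySem.Str.strip (pvNorm p)) pvDStep l d

theorem pvA_flat (values : List String) (d : PySem.Dict String Bool) :
    values.foldl (fun lookup value =>
      ((PySem.Str.split? (PySem.Str.replace value "," " ") " ").getD []).foldl (fun lookup p =>
        let namePart := PySem.Str.strip (pvNorm p)
        if namePart ≠ "" then
          if lookup.contains namePart then lookup.insert namePart true
          else lookup.insert namePart false
        else lookup) lookup) d
    = (values.flatMap pvParts).foldl pvDStep d := by
  induction values generalizing d with
  | nil => rfl
  | cons v vs ih =>
    simp only [List.foldl_cons, List.flatMap_cons, List.foldl_append]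
    rw [pvA_inner, ih]
    simp only [pvParts]

-- the dict A builds over a flat part list: keys are the distinct parts in first
-- appearance order, each flagged true exactly when it occurs more than once
theorem pvDict_char (ps : List String) :
    ps.foldl pvDStep PySem.Dict.empty
      = PySem.Dict.mk ((PySem.Set.ofList ps).map (fun k => (k, decide (1 < ps.count k)))) := by
  induction ps using List.reverseRecOn with
  | nil => rfl
  | append_singleton ps k ih =>
    rw [List.foldl_append, List.foldl_cons, List.foldl_nil, ih]
    have hkeys : (PySem.Dict.mk ((PySem.Set.ofList ps).map
        (fun k' => (k', decide (1 < ps.count k'))))).keys = PySem.Set.ofList ps := by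
      simp [PySem.Dict.keys, List.map_map, Function.comp_def]
    by_cases hk : k ∈ ps
    · have hc : (PySem.Dict.mk ((PySem.Set.ofList ps).map
          (fun k' => (k', decide (1 < ps.count k'))))).contains k = true := by
        rw [PySem.Dict.contains_iff_mem_keys, hkeys, PySem.Set.mem_ofList]; exact hk
      rw [pvDStep, if_pos hc]
      apply PySem.Dict.ext
      rw [PySem.Dict.items_insert_of_contains _ _ hc]
      rw [PySem.Set.ofList_append_singleton,
        PySem.Set.add_of_mem ((PySem.Set.mem_ofList ps k).mpr hk)]
      show ((PySem.Set.ofList ps).map _).map _ = _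
      rw [List.map_map]
      apply List.map_congr_left
      intro a ha
      by_cases hak : a = k
      · subst hak
        simp [Function.comp, hk]
      · have hne : (a == k) = false := beq_eq_false_iff_ne.mpr hak
        simp [Function.comp, hne, List.count_append, Ne.symm hak]
    · have hc : (PySem.Dict.mk ((PySem.Set.ofList ps).map
          (fun k' => (k', decide (1 < ps.count k'))))).contains k = false := by
        rw [← Bool.not_eq_true, PySem.Dict.contains_iff_mem_keys, hkeys,
          PySem.Set.mem_ofList]
        exact hk
      rw [pvDStep, if_neg (by simp [hc])]
      apply PySem.Dict.ext
      rw [PySem.Dict.items_insert_of_not_contains _ _ hc]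
      rw [PySem.Set.ofList_append_singleton,
        PySem.Set.add_of_not_mem (fun hm => hk ((PySem.Set.mem_ofList ps k).mp hm))]
      rw [List.map_append]
      have hck : List.count k ps = 0 := List.count_eq_zero.mpr hk
      congr 1
      · apply List.map_congr_left
        intro a ha
        have hak : a ≠ k := fun he => hk (he ▸ (PySem.Set.mem_ofList ps a).mp ha)
        simp [List.count_append, Ne.symm hak]
      · simp [List.count_append, hck]

theorem pvTrue_mem (ps : List String) :
    (true ∈ ((PySem.Set.ofList ps).map
        (fun k => (k, decide (1 < ps.count k)))).map (fun x => x.2))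
      ↔ ¬ ps.Nodup := by
  simp only [List.map_map, List.mem_map, Function.comp_apply, PySem.Set.mem_ofList]
  constructor
  · rintro ⟨k, -, hk⟩
    intro hn
    have := List.nodup_iff_count_le_one.mp hn k
    replace hk := of_decide_eq_true hk
    omega
  · intro hn
    rw [List.nodup_iff_count_le_one] at hn
    push Not at hn
    obtain ⟨k, hk⟩ := hn
    exact ⟨k, List.count_pos_iff.mp (by omega), decide_eq_true (by omega)⟩

theorem pvA_eq (values : List String) :
    overlappingValues values
      = (if true ∈ (((values.flatMap pvParts).foldl pvDStep PySem.Dict.empty).values)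
         then true else false) := by
  unfold overlappingValues
  rw [pvA_flat]

-- B's token list, non-empty-filtered, is the flat part list A walks
theorem pvB_tokens (values : List String) :
    (values.flatMap (fun value =>
      ((PySem.Str.split? (PySem.Str.replace value "," " ") " ").getD []).map
        (fun p => PySem.Str.strip (pvNorm p)))).filter (fun t => t ≠ "")
    = values.flatMap pvParts := by
  induction values with
  | nil => rfl
  | cons v vs ih =>
    simp only [List.flatMap_cons, List.filter_append, ih, pvParts]

-- on a ≤-sorted list, an equal adjacent pair exists iff the list has a duplicate
theorem pvAdj_char (l : List String) (hs : l.Pairwise (· ≤ ·)) :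
    (l.zip l.tail).any (fun ab => ab.1 == ab.2) = !decide l.Nodup := by
  induction l with
  | nil => rfl
  | cons x t ih =>
    rcases t with _ | ⟨y, t'⟩
    · simp
    · have hs' := (List.pairwise_cons.mp hs).2
      have hxy : x ≤ y := (List.pairwise_cons.mp hs).1 y (List.mem_cons_self)
      by_cases hxyeq : x = y
      · subst hxyeq
        have : ¬ (x :: x :: t').Nodup := by
          intro h
          exact (List.pairwise_cons.mp h).1 x List.mem_cons_self rfl
        simp [this]
      · have hx_notmem : x ∉ y :: t' := by
          intro hm
          rcases List.mem_cons.mp hm with h | h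
          · exact hxyeq h
          · have hyx : y ≤ x := by
              have := (List.pairwise_cons.mp hs').1 x h
              exact this
            exact hxyeq (le_antisymm hxy hyx)
        have hnodup : (x :: y :: t').Nodup ↔ (y :: t').Nodup := by
          constructor
          · exact fun h => (List.nodup_cons.mp h).2
          · exact fun h => List.nodup_cons.mpr ⟨hx_notmem, h⟩
        have hbeq : (x == y) = false := beq_eq_false_iff_ne.mpr hxyeq
        have ihe := ih hs'
        simp only [List.tail_cons] at ihe
        simp only [List.tail_cons, List.zip_cons_cons, List.any_cons, hbeq, Bool.false_or]
        rw [ihe]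
        by_cases hnd : (y :: t').Nodup
        · simp [hnd, hnodup.mpr hnd]
        · have h2 : ¬ (x :: y :: t').Nodup := fun hh => hnd (hnodup.mp hh)
          simp [hnd, h2]

-- ===== VERDICT (by name: the statement is the Claim_ definition above) =====
theorem overlappingValues_spec : Claim_equal_overlappingValues := by
  intro values _
  show overlappingValues values = overlappingValues_alt values
  rw [pvA_eq, pvDict_char]
  unfold overlappingValues_alt
  simp only [pvB_tokens, PySem.List.slice_from_one]
  have hperm : (PySem.List.sorted (values.flatMap pvParts) (fun x => x) false).Perm
      (values.flatMap pvParts) := PySem.List.sorted_perm _ _ _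
  rw [pvAdj_char _ (PySem.List.sorted_pairwise (values.flatMap pvParts) (fun x => x))]
  have hv : (PySem.Dict.mk ((PySem.Set.ofList (values.flatMap pvParts)).map
      (fun k => (k, decide (1 < (values.flatMap pvParts).count k))))).values
      = ((PySem.Set.ofList (values.flatMap pvParts)).map
      (fun k => (k, decide (1 < (values.flatMap pvParts).count k)))).map (fun x => x.2) := rfl
  rw [hv]
  by_cases h : (values.flatMap pvParts).Nodup
  · rw [if_neg (fun hm => (pvTrue_mem _).mp hm h)]
    simp [hperm.nodup_iff.mpr h]
  · rw [if_pos ((pvTrue_mem _).mpr h)]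
    have h2 : ¬ (PySem.List.sorted (values.flatMap pvParts) (fun x => x) false).Nodup :=
      fun hnd => h (hperm.nodup_iff.mp hnd)
    simp [h2]
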